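-- pv_equiv track=rewrite | github.com/Parkseojin2001/coding_test | 프로그래머스/1/12917. 문자열 내림차순으로 배치하기/문자열 내림차순으로 배치하기.py | solution
-- ===== SOURCE A (Python) =====
-- def solution(s):
--     small = []
--     big = []
--     for c in s:
--         if c >= 'A' and c <= 'Z':
--             big.append(c)
--         else:
--             small.append(c)
--     big.sort(reverse=True)
--     small.sort(reverse=True)
--     return ''.join(small) + ''.join(big)
-- ===== SOURCE B (Python) =====
-- def solution(s):
--     # Count char frequencies once, then emit the fixed ASCII alphabet descending (no sorting).
--     counts = {}
--     for c in s:
--         counts[c] = counts.get(c, 0) + 1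
--     parts = []
--     for code in range(126, 8, -1):          # all printable ASCII + tab/newline/CR, descending
--         if not (65 <= code <= 90):          # non-uppercase bucket first
--             parts.append(chr(code) * counts.get(chr(code), 0))
--     for code in range(90, 64, -1):          # then the uppercase bucket, descending
--         parts.append(chr(code) * counts.get(chr(code), 0))
--     return ''.join(parts)
-- ===== Notes on version B (the rewrite author's own statement) =====
-- stated objective: alternative
-- what changed: Replaces the partition-then-two-comparison-sorts with a single counting pass (a char-frequency dict) plus emission of the fixed descending ASCII alphabet, non-uppercase codes first then uppercase, so no sorting is performed at all.
import Mathlib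
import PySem

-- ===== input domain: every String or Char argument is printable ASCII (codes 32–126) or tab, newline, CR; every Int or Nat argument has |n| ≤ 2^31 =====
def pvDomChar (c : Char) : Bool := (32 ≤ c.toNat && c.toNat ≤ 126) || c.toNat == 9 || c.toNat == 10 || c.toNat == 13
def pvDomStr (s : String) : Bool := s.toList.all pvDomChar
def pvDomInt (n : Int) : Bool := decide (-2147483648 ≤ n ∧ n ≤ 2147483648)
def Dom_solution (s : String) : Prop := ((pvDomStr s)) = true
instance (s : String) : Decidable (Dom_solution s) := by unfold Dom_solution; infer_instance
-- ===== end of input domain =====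

-- B replaces the partition-then-two-comparison-sorts with a counting pass (char-frequency
-- dict) and emission of the fixed descending ASCII alphabet, non-uppercase codes then
-- uppercase; equal return values, no sorting performed.

-- ===== PORT A =====
def solution (s : String) : String :=
  let pr := s.toList.foldl
    (fun (p : List Char × List Char) c =>
      if 'A' ≤ c ∧ c ≤ 'Z' then (p.1, p.2 ++ [c]) else (p.1 ++ [c], p.2))
    ([], [])
  String.mk (PySem.List.sorted pr.1 (fun x => x) true ++ PySem.List.sorted pr.2 (fun x => x) true)

-- ===== PORT B =====
def solution_alt (s : String) : String :=
  let counts : PySem.Dict Char Int :=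
    s.toList.foldl (fun d c => d.insert c (d.getD c 0 + 1)) PySem.Dict.empty
  let parts : List Char :=
    (PySem.List.pyRange 126 8 (-1)).foldl
      (fun acc code =>
        if ¬ (65 ≤ code ∧ code ≤ 90) then
          acc ++ List.replicate (counts.getD (Char.ofNat code.toNat) 0).toNat (Char.ofNat code.toNat)
        else acc)
      []
  let parts2 : List Char :=
    (PySem.List.pyRange 90 64 (-1)).foldl
      (fun acc code =>
        acc ++ List.replicate (counts.getD (Char.ofNat code.toNat) 0).toNat (Char.ofNat code.toNat))
      parts
  String.mk parts2

-- ===== PRECONDITION & SPEC =====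
def Spec_solution (s : String) (out : String) : Prop := out = solution_alt s
instance (s : String) (out : String) : Decidable (Spec_solution s out) := by unfold Spec_solution; infer_instance

-- ===== CLAIM (what is proved, stated in full; the proofs are below) =====
def Claim_equal_solution : Prop := ∀ (s : String), Dom_solution s → Spec_solution s (solution s)

-- ===== LEMMAS AND PROOFS =====

theorem toNat_ofNat_small (n : Nat) (h : n < 128) : (Char.ofNat n).toNat = n := by
  simp [Char.toNat_ofNat]; omega

theorem char_le_iff_toNat (a b : Char) : a ≤ b ↔ a.toNat ≤ b.toNat := by
  rw [Char.le_def, UInt32.le_iff_toNat_le]; rfl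

theorem ofNat_le_ofNat (a b : Nat) (ha : a < 128) (hb : b < 128) (h : a ≤ b) :
    Char.ofNat a ≤ Char.ofNat b := by
  rw [char_le_iff_toNat, toNat_ofNat_small a ha, toNat_ofNat_small b hb]; exact h

theorem upper_iff (a : Char) : ('A' ≤ a ∧ a ≤ 'Z') ↔ (65 ≤ a.toNat ∧ a.toNat ≤ 90) := by
  rw [char_le_iff_toNat, char_le_iff_toNat]
  constructor <;> (intro ⟨h1, h2⟩; exact ⟨by simpa using h1, by simpa using h2⟩)

-- the partition loop of A
theorem part_foldl (l : List Char) (a b : List Char) :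
    l.foldl
      (fun (p : List Char × List Char) c =>
        if 'A' ≤ c ∧ c ≤ 'Z' then (p.1, p.2 ++ [c]) else (p.1 ++ [c], p.2)) (a, b)
    = (a ++ l.filter (fun c => !(decide ('A' ≤ c ∧ c ≤ 'Z'))),
       b ++ l.filter (fun c => decide ('A' ≤ c ∧ c ≤ 'Z'))) := by
  induction l generalizing a b with
  | nil => simp
  | cons c t ih =>
    by_cases h : ('A' ≤ c ∧ c ≤ 'Z') <;> simp [List.filter_cons, h, ih]

-- a guarded extend-loop is a flatMap over the filtered list
theorem foldl_append_if_list {α β : Type} (p : α → Prop) [DecidablePred p]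
    (g : α → List β) (l : List α) (acc : List β) :
    l.foldl (fun acc x => if p x then acc ++ g x else acc) acc
      = acc ++ (l.filter (fun x => decide (p x))).flatMap g := by
  induction l generalizing acc with
  | nil => simp
  | cons x t ih => by_cases h : p x <;> simp [List.filter_cons, h, ih]

theorem count_flatMap_replicate (l : List Char) (ks : List Int)
    (hv : ∀ k ∈ ks, 0 ≤ k ∧ k < 128) (hnd : ks.Nodup) (c : Char) :
    (ks.flatMap (fun k =>
        List.replicate (l.count (Char.ofNat k.toNat)) (Char.ofNat k.toNat))).count c
      = if ((c.toNat : Int) ∈ ks) then l.count c else 0 := by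
  induction ks with
  | nil => simp
  | cons k t ih =>
    have hk := hv k (by simp)
    have hnd' := hnd
    simp only [List.nodup_cons] at hnd'
    by_cases hek : (c.toNat : Int) = k
    · have hc : Char.ofNat k.toNat = c := by
        have : k.toNat = c.toNat := by omega
        rw [this, Char.ofNat_toNat]
      simp only [List.flatMap_cons, List.count_append, hc, List.count_replicate,
        beq_self_eq_true, if_true]
      rw [ih (fun x hx => hv x (by simp [hx])) hnd'.2]
      have hmem : (c.toNat : Int) ∉ t := by rw [hek]; exact hnd'.1
      rw [if_neg hmem, if_pos (by simp [hek])]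
      omega
    · have hc : (Char.ofNat k.toNat == c) = false := by
        apply beq_false_of_ne
        intro he
        apply hek
        have := toNat_ofNat_small k.toNat (by omega)
        rw [he] at this
        omega
      simp only [List.flatMap_cons, List.count_append, List.count_replicate, hc]
      rw [ih (fun x hx => hv x (by simp [hx])) hnd'.2]
      simp [hek]

theorem pairwise_flatMap_replicate (l : List Char) (ks : List Int)
    (hv : ∀ k ∈ ks, 0 ≤ k ∧ k < 128) (hdec : ks.Pairwise (· > ·)) :
    (ks.flatMap (fun k =>
        List.replicate (l.count (Char.ofNat k.toNat)) (Char.ofNat k.toNat))).Pairwise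
      (fun a b => b ≤ a) := by
  induction ks with
  | nil => simp
  | cons k t ih =>
    have hk := hv k (by simp)
    rw [List.flatMap_cons, List.pairwise_append]
    refine ⟨?_, ih (fun x hx => hv x (by simp [hx])) (List.Pairwise.sublist (by simp) hdec), ?_⟩
    · rw [List.pairwise_replicate]; right; exact le_refl _
    · intro x hx y hy
      have hxe : x = Char.ofNat k.toNat := (List.eq_of_mem_replicate hx)
      obtain ⟨k', hk't, hy'⟩ := List.mem_flatMap.mp hy
      have hye : y = Char.ofNat k'.toNat := List.eq_of_mem_replicate hy'
      have hk' := hv k' (by simp [hk't])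
      have hlt : k > k' := (List.pairwise_cons.mp hdec).1 k' hk't
      rw [hxe, hye]
      exact ofNat_le_ofNat _ _ (by omega) (by omega) (by omega)

-- the heart: emitting count-many copies of each code, codes strictly descending and
-- covering every character of l, reproduces Python's reverse sort of l
theorem flatMap_eq_sorted (l : List Char) (ks : List Int)
    (hv : ∀ k ∈ ks, 0 ≤ k ∧ k < 128) (hdec : ks.Pairwise (· > ·))
    (hcov : ∀ c ∈ l, (c.toNat : Int) ∈ ks) :
    ks.flatMap (fun k =>
        List.replicate (l.count (Char.ofNat k.toNat)) (Char.ofNat k.toNat))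
      = PySem.List.sorted l (fun x => x) true := by
  have hnd : ks.Nodup := hdec.imp (fun h => ne_of_gt h)
  apply List.eq_of_perm_of_sorted
    (le := fun a b : Char => b ≤ a)
    (fun a b _ _ h1 h2 => le_antisymm h2 h1)
    (pairwise_flatMap_replicate l ks hv hdec)
    (PySem.List.sorted_pairwise_rev l (fun x => x))
  refine List.Perm.trans ?_ (PySem.List.sorted_perm l (fun x => x) true).symm
  rw [List.perm_iff_count]
  intro c
  rw [count_flatMap_replicate l ks hv hnd c]
  by_cases hc : c ∈ l
  · simp [hcov c hc]
  · split <;> simp [List.count_eq_zero_of_not_mem hc]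

-- decidable facts about the two literal ranges
set_option maxRecDepth 4000 in
theorem hvR1 : ∀ k ∈ PySem.List.pyRange 126 8 (-1), 9 ≤ k ∧ k ≤ 126 := by decide
set_option maxRecDepth 4000 in
theorem hdecR1 : (PySem.List.pyRange 126 8 (-1)).Pairwise (· > ·) := by decide
theorem hvR2 : ∀ k ∈ PySem.List.pyRange 90 64 (-1), 65 ≤ k ∧ k ≤ 90 := by decide
theorem hdecR2 : (PySem.List.pyRange 90 64 (-1)).Pairwise (· > ·) := by decide
set_option maxRecDepth 4000 in
theorem memR1 : ∀ n : Nat, n < 127 → 9 ≤ n → ((n : Int) ∈ PySem.List.pyRange 126 8 (-1)) := by decide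
set_option maxRecDepth 4000 in
theorem memR2 : ∀ n : Nat, n < 91 → 65 ≤ n → ((n : Int) ∈ PySem.List.pyRange 90 64 (-1)) := by decide

-- ===== VERDICT (by name: the statement is the Claim_ definition above) =====
theorem solution_spec : Claim_equal_solution := by
  intro s hdom
  unfold Spec_solution solution solution_alt
  simp only
  set l := s.toList with hl
  have hdomc : ∀ c ∈ l, 9 ≤ c.toNat ∧ c.toNat ≤ 126 := by
    intro c hc
    have := (List.all_eq_true.mp hdom) c hc
    simp only [pvDomChar, Bool.or_eq_true, Bool.and_eq_true, decide_eq_true_eq, beq_iff_eq] at this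
    omega
  -- A side
  rw [part_foldl]
  set pU : Char → Bool := (fun c => decide ('A' ≤ c ∧ c ≤ 'Z')) with hpU
  set small := l.filter (fun c => !(pU c)) with hsmall
  set big := l.filter pU with hbig
  simp only [List.nil_append]
  -- B side: counter
  have hcnt : ∀ c : Char,
      ((l.foldl (fun (d : PySem.Dict Char Int) c => d.insert c (d.getD c 0 + 1)) PySem.Dict.empty).getD c 0)
        = (l.count c : Int) := by
    intro c
    rw [PySem.Dict.getD_foldl_insert_add_one]
    simp [PySem.Dict.getD_empty]
  -- B side: loops to flatMaps
  rw [foldl_append_if_list (fun code : Int => ¬ (65 ≤ code ∧ code ≤ 90)), List.nil_append,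
      PySem.List.foldl_append_eq_flatMap]
  set pC : Int → Bool := (fun code => decide ¬ (65 ≤ code ∧ code ≤ 90)) with hpC
  -- rewrite each block to use the bucket's own count
  have hblock1 :
      ((PySem.List.pyRange 126 8 (-1)).filter pC).flatMap
          (fun code => List.replicate
            ((l.foldl (fun (d : PySem.Dict Char Int) c => d.insert c (d.getD c 0 + 1)) PySem.Dict.empty).getD
              (Char.ofNat code.toNat) 0).toNat (Char.ofNat code.toNat))
        = ((PySem.List.pyRange 126 8 (-1)).filter pC).flatMap
          (fun code => List.replicate (small.count (Char.ofNat code.toNat)) (Char.ofNat code.toNat)) := by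
    simp only [List.flatMap]
    congr 1
    apply List.map_congr_left
    intro k hk
    rw [List.mem_filter] at hk
    have hb := hvR1 k hk.1
    have hpk : ¬ (65 ≤ k ∧ k ≤ 90) := by
      have h2 := hk.2
      rw [hpC, decide_eq_true_eq] at h2
      exact h2
    have hnu : (!(pU (Char.ofNat k.toNat))) = true := by
      rw [hpU]
      simp only [Bool.not_eq_true', decide_eq_false_iff_not]
      rw [upper_iff, toNat_ofNat_small k.toNat (by omega)]
      omega
    rw [hcnt]
    have hcf : List.count (Char.ofNat k.toNat) (List.filter (fun c => !pU c) l)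
        = List.count (Char.ofNat k.toNat) l := List.count_filter (p := fun c => !pU c) hnu
    rw [hcf]
    simp
  have hblock2 :
      (PySem.List.pyRange 90 64 (-1)).flatMap
          (fun code => List.replicate
            ((l.foldl (fun (d : PySem.Dict Char Int) c => d.insert c (d.getD c 0 + 1)) PySem.Dict.empty).getD
              (Char.ofNat code.toNat) 0).toNat (Char.ofNat code.toNat))
        = (PySem.List.pyRange 90 64 (-1)).flatMap
          (fun code => List.replicate (big.count (Char.ofNat code.toNat)) (Char.ofNat code.toNat)) := by
    simp only [List.flatMap]
    congr 1
    apply List.map_congr_left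
    intro k hk
    have hb := hvR2 k hk
    have hu : pU (Char.ofNat k.toNat) = true := by
      rw [hpU]
      simp only [decide_eq_true_eq]
      rw [upper_iff, toNat_ofNat_small k.toNat (by omega)]
      omega
    rw [hcnt]
    have hcf : List.count (Char.ofNat k.toNat) (List.filter pU l)
        = List.count (Char.ofNat k.toNat) l := List.count_filter (p := pU) hu
    rw [hcf]
    simp
  rw [hblock1, hblock2]
  -- apply the master lemma to each bucket
  rw [flatMap_eq_sorted small ((PySem.List.pyRange 126 8 (-1)).filter pC)
        (fun k hk => by have := hvR1 k (List.mem_filter.mp hk).1; omega)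
        (hdecR1.filter pC)
        (by
          intro c hc
          rw [hsmall, List.mem_filter] at hc
          have hd := hdomc c hc.1
          have hnu : ¬ ('A' ≤ c ∧ c ≤ 'Z') := by
            have h2 := hc.2
            rw [hpU, Bool.not_eq_true', decide_eq_false_iff_not] at h2
            exact h2
          rw [upper_iff] at hnu
          rw [List.mem_filter]
          refine ⟨memR1 c.toNat (by omega) (by omega), ?_⟩
          rw [hpC]
          simp only [decide_eq_true_eq]
          omega),
      flatMap_eq_sorted big (PySem.List.pyRange 90 64 (-1))
        (fun k hk => by have := hvR2 k hk; omega)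
        hdecR2
        (by
          intro c hc
          rw [hbig, List.mem_filter] at hc
          have hu : ('A' ≤ c ∧ c ≤ 'Z') := by
            have h2 := hc.2
            rw [hpU, decide_eq_true_eq] at h2
            exact h2
          rw [upper_iff] at hu
          exact memR2 c.toNat (by omega) (by omega))]
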